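-- pv_equiv track=rewrite | github.com/TaoziLake/analyzer | unidiff_extract/agent_neg_control.py | _mut_add_fake_param
-- ===== SOURCE A (Python) =====
-- def _mut_add_fake_param(doc: str) -> str:
--     if not doc:
--         return doc
--     lines = doc.splitlines()
--     out = []
--     inserted = False
--     for ln in lines:
--         out.append(ln)
--         if (not inserted) and ln.strip() == "Args:":
--             out.append("    fake_param:")
--             inserted = True
--     return "\n".join(out)
-- ===== SOURCE B (Python) =====
-- def _mut_add_fake_param(doc: str) -> str:
--     lines = doc.splitlines()
--     idx = next((i for i, ln in enumerate(lines) if ln.strip() == "Args:"), None)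
--     if idx is not None:
--         lines.insert(idx + 1, "    fake_param:")
--     return "\n".join(lines)
-- ===== Notes on version B (the rewrite author's own statement) =====
-- stated objective: simpler
-- what changed: Replaces A's flag-carrying rebuild loop (accumulator list + inserted boolean) with a find-the-index-then-insert decomposition: locate the first 'Args:' line with next/enumerate and splice the fake param in with list.insert; the empty-doc guard disappears because splitlines/join already handle it.
import Mathlib
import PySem

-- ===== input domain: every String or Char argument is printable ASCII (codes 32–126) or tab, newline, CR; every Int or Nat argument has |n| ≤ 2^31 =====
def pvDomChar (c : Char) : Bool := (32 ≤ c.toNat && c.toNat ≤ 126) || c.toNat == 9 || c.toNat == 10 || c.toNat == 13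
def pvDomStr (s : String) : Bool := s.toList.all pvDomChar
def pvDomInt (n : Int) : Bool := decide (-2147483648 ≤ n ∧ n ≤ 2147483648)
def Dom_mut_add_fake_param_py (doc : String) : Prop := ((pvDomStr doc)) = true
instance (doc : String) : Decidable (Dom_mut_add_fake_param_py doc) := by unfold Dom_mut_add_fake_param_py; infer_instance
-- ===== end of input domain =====

-- B replaces A's flag-carrying rebuild loop with find-first-'Args:'-index then list.insert (simpler decomposition, same cost).

-- ===== PORT A =====
-- literal transliteration of A: guard, splitlines, loop appending each line and
-- (once) the fake param after the first 'Args:' line, join.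
def mut_add_fake_param_py (doc : String) : String :=
  if doc = "" then doc
  else
    let lines := PySem.Str.splitlines doc
    let r := lines.foldl
      (fun (s : List String × Bool) (ln : String) =>
        let out := s.1 ++ [ln]
        if !s.2 && (PySem.Str.strip ln == "Args:") then (out ++ ["    fake_param:"], true)
        else (out, s.2))
      ([], false)
    PySem.Str.join "\n" r.1

-- ===== PORT B =====
-- literal transliteration of Source B: splitlines, next((i for i,ln in enumerate(...) if ...), None),
-- lines.insert(idx+1, ...), join.
def mut_add_fake_param_py_alt (doc : String) : String :=
  let lines := PySem.Str.splitlines doc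
  let idx? := ((PySem.List.enumerate lines).find?
      (fun p => PySem.Str.strip p.2 == "Args:")).map (·.1)
  let lines' := match idx? with
    | some i => PySem.List.insert lines (i + 1) "    fake_param:"
    | none => lines
  PySem.Str.join "\n" lines'

-- ===== PRECONDITION & SPEC =====
def Spec_mut_add_fake_param_py (doc : String) (out : String) : Prop := out = mut_add_fake_param_py_alt doc
instance (doc : String) (out : String) : Decidable (Spec_mut_add_fake_param_py doc out) := by unfold Spec_mut_add_fake_param_py; infer_instance

-- ===== CLAIM (what is proved, stated in full; the proofs are below) =====
def Claim_equal_mut_add_fake_param_py : Prop := ∀ (doc : String), Dom_mut_add_fake_param_py doc → Spec_mut_add_fake_param_py doc (mut_add_fake_param_py doc)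

-- ===== LEMMAS AND PROOFS =====

-- direct-recursion rendering of A's loop state (out eliminated), for the proof
def pvGo : List String → Bool → List String × Bool
  | [], ins => ([], ins)
  | ln :: rest, ins =>
    if !ins && (PySem.Str.strip ln == "Args:") then
      (ln :: "    fake_param:" :: (pvGo rest true).1, (pvGo rest true).2)
    else
      (ln :: (pvGo rest ins).1, (pvGo rest ins).2)

lemma pvFoldl_eq_go : ∀ (L : List String) (out : List String) (ins : Bool),
    L.foldl
      (fun (s : List String × Bool) (ln : String) =>
        let out := s.1 ++ [ln]
        if !s.2 && (PySem.Str.strip ln == "Args:") then (out ++ ["    fake_param:"], true)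
        else (out, s.2))
      (out, ins)
    = (out ++ (pvGo L ins).1, (pvGo L ins).2) := by
  intro L
  induction L with
  | nil => intro out ins; simp [pvGo]
  | cons ln rest ih =>
    intro out ins
    by_cases h : (!ins && (PySem.Str.strip ln == "Args:")) = true
    · simp only [List.foldl_cons, h, if_pos, pvGo]
      rw [ih]
      simp [h]
    · simp only [List.foldl_cons, pvGo, if_neg h]
      rw [ih]
      simp [h]

lemma pvGo_true : ∀ (L : List String), pvGo L true = (L, true) := by
  intro L
  induction L with
  | nil => simp [pvGo]
  | cons ln rest ih => simp [pvGo, ih]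

lemma pvGo_false (L : List String) :
    (pvGo L false).1 =
      match L.findIdx? (fun ln => PySem.Str.strip ln == "Args:") with
      | none => L
      | some k => L.take (k + 1) ++ "    fake_param:" :: L.drop (k + 1) := by
  induction L with
  | nil => simp [pvGo]
  | cons ln rest ih =>
    by_cases h : (PySem.Str.strip ln == "Args:") = true
    · simp [pvGo, h, pvGo_true, List.findIdx?_cons]
    · simp only [pvGo, h, Bool.not_true, Bool.and_false, Bool.false_and, Bool.and_self,
        if_neg, List.findIdx?_cons, Bool.not_false, Bool.true_and]
      rw [ih]
      cases hr : rest.findIdx? (fun ln => PySem.Str.strip ln == "Args:") with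
      | none => simp [h, hr]
      | some k => simp [h, hr, List.take_succ_cons, List.drop_succ_cons]

lemma pvFind_enum (xs : List String) : ∀ (s : Int),
    (((PySem.List.enumerate xs s).find? (fun p => PySem.Str.strip p.2 == "Args:")).map (·.1))
    = (xs.findIdx? (fun ln => PySem.Str.strip ln == "Args:")).map (fun k : Nat => s + (k : Int)) := by
  induction xs with
  | nil => intro s; simp [PySem.List.enumerate_nil]
  | cons x xs ih =>
    intro s
    by_cases h : (PySem.Str.strip x == "Args:") = true
    · simp [PySem.List.enumerate_cons, List.find?_cons, h, List.findIdx?_cons]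
    · simp only [PySem.List.enumerate_cons, List.find?_cons, h, List.findIdx?_cons, if_neg]
      rw [ih (s + 1)]
      cases hr : xs.findIdx? (fun ln => PySem.Str.strip ln == "Args:") with
      | none => simp [h, hr]
      | some k =>
        simp [h, hr, Option.map_map]
        push_cast
        ring

lemma pvFindIdx_lt {p : String → Bool} {L : List String} {k : Nat}
    (h : L.findIdx? p = some k) : k < L.length := by
  have := List.findIdx?_eq_some_iff_findIdx_eq.1 h
  omega

lemma pvJoin_main (L : List String) :
    PySem.Str.join "\n" (pvGo L false).1
    = PySem.Str.join "\n"
        (match ((PySem.List.enumerate L (0 : Int)).find?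
            (fun p => PySem.Str.strip p.2 == "Args:")).map (·.1) with
          | some i => PySem.List.insert L (i + 1) "    fake_param:"
          | none => L) := by
  rw [pvFind_enum L 0, pvGo_false]
  cases hr : L.findIdx? (fun ln => PySem.Str.strip ln == "Args:") with
  | none => simp
  | some k =>
    have hle : k + 1 ≤ L.length := pvFindIdx_lt hr
    have hcast : (0 : Int) + (k : Int) + 1 = ((k + 1 : Nat) : Int) := by omega
    simp only [Option.map_some]
    rw [hcast, PySem.List.insert_natCast L (k + 1) _ hle]

-- ===== VERDICT (by name: the statement is the Claim_ definition above) =====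
theorem mut_add_fake_param_py_spec : Claim_equal_mut_add_fake_param_py := by
  intro doc _
  unfold Spec_mut_add_fake_param_py mut_add_fake_param_py mut_add_fake_param_py_alt
  by_cases h : doc = ""
  · subst h; decide
  · simp only [if_neg h]
    rw [pvFoldl_eq_go]
    simpa using pvJoin_main (PySem.Str.splitlines doc)
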